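-- pv_equiv track=rewrite | github.com/riot662006/fisk-course-notifier | src/utils.py | stylize_code
-- ===== SOURCE A (Python) =====
-- def stylize_code(code: str) -> str:
--     result: list[str] = []
--
--     for char in code:
--         if 'A' <= char <= 'Z':
--             # Italic capital A-Z: U+1D468
--             result.append(chr(0x1D468 + ord(char) - ord('A')))
--         elif 'a' <= char <= 'z':
--             # Italic lowercase a-z: U+1D482
--             result.append(chr(0x1D482 + ord(char) - ord('a')))
--         elif '0' <= char <= '9':
--             # Bold digits: U+1D7CE
--             result.append(chr(0x1D7CE + int(char)))
--         else:
--             result.append(char)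
--
--     return ''.join(result)
-- ===== SOURCE B (Python) =====
-- _TABLE: dict[int, str] = {}
-- for _i in range(26):
--     _TABLE[ord('A') + _i] = chr(0x1D468 + _i)
--     _TABLE[ord('a') + _i] = chr(0x1D482 + _i)
-- for _d in range(10):
--     _TABLE[ord('0') + _d] = chr(0x1D7CE + _d)
--
--
-- def stylize_code(code: str) -> str:
--     return code.translate(_TABLE)
-- ===== Notes on version B (the rewrite author's own statement) =====
-- stated objective: idiomatic
-- what changed: Replaced the per-character if/elif branch dispatch with a translation table precomputed once by range loops and a single str.translate pass.
import Mathlib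
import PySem

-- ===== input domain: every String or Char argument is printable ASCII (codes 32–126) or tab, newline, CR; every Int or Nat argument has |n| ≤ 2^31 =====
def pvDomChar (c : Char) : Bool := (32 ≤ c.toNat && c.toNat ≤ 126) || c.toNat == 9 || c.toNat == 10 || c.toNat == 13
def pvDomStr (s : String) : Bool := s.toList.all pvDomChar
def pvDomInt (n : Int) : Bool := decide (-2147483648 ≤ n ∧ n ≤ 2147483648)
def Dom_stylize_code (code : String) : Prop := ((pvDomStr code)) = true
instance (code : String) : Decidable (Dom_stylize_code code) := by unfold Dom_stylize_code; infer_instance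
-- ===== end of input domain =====

-- B replaces A's per-character if/elif dispatch by a translation table built once and one table-driven pass (idiomatic).

-- ===== PORT A =====
-- per-character branch dispatch, appending to a result list, then joined
def stylize_code (code : String) : String :=
  let result : List Char :=
    code.toList.foldl (fun r char =>
      if 'A' ≤ char ∧ char ≤ 'Z' then
        r ++ [Char.ofNat (0x1D468 + char.toNat - 'A'.toNat)]
      else if 'a' ≤ char ∧ char ≤ 'z' then
        r ++ [Char.ofNat (0x1D482 + char.toNat - 'a'.toNat)]
      else if '0' ≤ char ∧ char ≤ '9' then
        r ++ [Char.ofNat (0x1D7CE + (char.toNat - '0'.toNat))]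
      else
        r ++ [char]) []
  String.mk result

-- ===== PORT B =====
-- the translation table _TABLE, built by the two module-level range loops
def pvTable : PySem.Dict Int Char :=
  let t := (PySem.List.pyRange 0 26 1).foldl (fun t i =>
    (t.insert ((65 : Int) + i) (Char.ofNat (0x1D468 + i).toNat)).insert
      ((97 : Int) + i) (Char.ofNat (0x1D482 + i).toNat)) PySem.Dict.empty
  (PySem.List.pyRange 0 10 1).foldl (fun t d =>
    t.insert ((48 : Int) + d) (Char.ofNat (0x1D7CE + d).toNat)) t

-- str.translate: each char is looked up by code point; missing keys pass through
def stylize_code_alt (code : String) : String :=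
  String.mk (code.toList.map (fun c => (pvTable.get? (c.toNat : Int)).getD c))

-- ===== PRECONDITION & SPEC =====
def Spec_stylize_code (code : String) (out : String) : Prop := out = stylize_code_alt code
instance (code : String) (out : String) : Decidable (Spec_stylize_code code out) := by unfold Spec_stylize_code; infer_instance

-- ===== CLAIM (what is proved, stated in full; the proofs are below) =====
def Claim_equal_stylize_code : Prop := ∀ (code : String), Dom_stylize_code code → Spec_stylize_code code (stylize_code code)

-- ===== LEMMAS AND PROOFS =====

-- the per-character map A computes
def pvStepA (char : Char) : Char :=
  if 'A' ≤ char ∧ char ≤ 'Z' then Char.ofNat (0x1D468 + char.toNat - 'A'.toNat)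
  else if 'a' ≤ char ∧ char ≤ 'z' then Char.ofNat (0x1D482 + char.toNat - 'a'.toNat)
  else if '0' ≤ char ∧ char ≤ '9' then Char.ofNat (0x1D7CE + (char.toNat - '0'.toNat))
  else char

-- on every ASCII code point (< 128) the branch dispatch and the table lookup agree
set_option maxRecDepth 40000 in
theorem pvStep_agree : ∀ n : Fin 128,
    pvStepA (Char.ofNat n.val) = (pvTable.get? ((Char.ofNat n.val).toNat : Int)).getD (Char.ofNat n.val) := by
  decide

-- ===== VERDICT (by name: the statement is the Claim_ definition above) =====
set_option maxRecDepth 40000 in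
theorem stylize_code_spec : Claim_equal_stylize_code := by
  intro code hdom
  unfold Spec_stylize_code stylize_code stylize_code_alt
  have hbody : ∀ (r : List Char) (char : Char),
      (if 'A' ≤ char ∧ char ≤ 'Z' then r ++ [Char.ofNat (0x1D468 + char.toNat - 'A'.toNat)]
       else if 'a' ≤ char ∧ char ≤ 'z' then r ++ [Char.ofNat (0x1D482 + char.toNat - 'a'.toNat)]
       else if '0' ≤ char ∧ char ≤ '9' then r ++ [Char.ofNat (0x1D7CE + (char.toNat - '0'.toNat))]
       else r ++ [char]) = r ++ [pvStepA char] := by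
    intro r char
    unfold pvStepA
    split_ifs <;> rfl
  simp only [hbody, PySem.List.foldl_append_singleton_eq_map]
  congr 1
  apply List.map_congr_left
  intro c hc
  have hdc : pvDomChar c = true := by
    have := (List.all_eq_true).1 hdom c hc
    simpa using this
  have hlt : c.toNat < 128 := by
    simp [pvDomChar] at hdc
    omega
  have hofNat : Char.ofNat c.toNat = c := Char.ofNat_toNat c
  have := pvStep_agree ⟨c.toNat, hlt⟩
  simpa [hofNat] using this
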